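-- pv_equiv track=rewrite | github.com/wisdomproto/korea-history | scripts/match-youtube-timestamps.py | derive_question_starts
-- ===== SOURCE A (Python) =====
-- def derive_question_starts(aligned, total_questions, video_duration):
--     """Derive question start times from aligned answer times.
--
--     Each answer marks the END of a question.
--     The next question starts ~3 seconds after the answer.
--     The first question starts at the FIRST detected transition or ~4 min in.
--     """
--     # answer_times: question_number → answer_time
--     answer_times = {qn: time for qn, time, _, _, _ in aligned}
--
--     # Question N starts right after question N-1's answer
--     question_starts = {}
--
--     for qn in range(1, total_questions + 1):
--         if qn == 1:
--             # Q1 starts before its answer — estimate from first answer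
--             if 1 in answer_times:
--                 # Q1 explanation typically lasts 40-80 sec before answer
--                 question_starts[1] = max(answer_times[1] - 60, 0)
--             else:
--                 question_starts[1] = 240  # Default 4 min (after intro)
--         elif (qn - 1) in answer_times:
--             # Start right after previous question's answer
--             question_starts[qn] = answer_times[qn - 1] + 3
--         # else: will be interpolated
--
--     # Interpolate gaps
--     known = sorted(question_starts.items())
--     for qn in range(1, total_questions + 1):
--         if qn in question_starts:
--             continue
--
--         before = [(q, t) for q, t in known if q < qn]
--         after = [(q, t) for q, t in known if q > qn]
--
--         if before and after:
--             q_b, t_b = before[-1]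
--             q_a, t_a = after[0]
--             ratio = (qn - q_b) / (q_a - q_b)
--             question_starts[qn] = int(t_b + ratio * (t_a - t_b))
--         elif before:
--             q_b, t_b = before[-1]
--             avg = (known[-1][1] - known[0][1]) / max(known[-1][0] - known[0][0], 1)
--             question_starts[qn] = min(int(t_b + (qn - q_b) * avg), video_duration - 10)
--         else:
--             question_starts[qn] = 0
--
--     return question_starts
-- ===== SOURCE B (Python) =====
-- from bisect import bisect_left
--
-- def derive_question_starts(aligned, total_questions, video_duration):
--     """Derive question start times from aligned answer times.
--
--     Same result as the original, but the known points are built directly as a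
--     sorted list (no dict + sort), the per-gap neighbours are found by binary
--     search instead of two full filtering passes, and the average pace is
--     computed once instead of per missing question.
--     """
--     answer_times = {qn: t for qn, t, _, _, _ in aligned}
--
--     known = []
--     if total_questions >= 1:
--         if 1 in answer_times:
--             known.append((1, max(answer_times[1] - 60, 0)))
--         else:
--             known.append((1, 240))
--         for qn in range(2, total_questions + 1):
--             if qn - 1 in answer_times:
--                 known.append((qn, answer_times[qn - 1] + 3))
--
--     keys = [q for q, _ in known]
--     avg = ((known[-1][1] - known[0][1]) / max(known[-1][0] - known[0][0], 1)
--            if known else 0.0)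
--
--     out = dict(known)
--     for qn in range(1, total_questions + 1):
--         if qn in out:
--             continue
--         i = bisect_left(keys, qn)
--         if i < len(keys):
--             q_b, t_b = known[i - 1]
--             q_a, t_a = known[i]
--             out[qn] = int(t_b + (qn - q_b) / (q_a - q_b) * (t_a - t_b))
--         else:
--             q_b, t_b = known[-1]
--             out[qn] = min(int(t_b + (qn - q_b) * avg), video_duration - 10)
--     return out
-- ===== Notes on version B (the rewrite author's own statement) =====
-- stated objective: faster
-- what changed: B builds the known anchor points directly as a sorted list (no intermediate dict plus sorted()), finds each missing question's neighbours with bisect_left binary search instead of two full filtering passes over the known list per question, and hoists the average-pace computation out of the loop.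
import Mathlib
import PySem

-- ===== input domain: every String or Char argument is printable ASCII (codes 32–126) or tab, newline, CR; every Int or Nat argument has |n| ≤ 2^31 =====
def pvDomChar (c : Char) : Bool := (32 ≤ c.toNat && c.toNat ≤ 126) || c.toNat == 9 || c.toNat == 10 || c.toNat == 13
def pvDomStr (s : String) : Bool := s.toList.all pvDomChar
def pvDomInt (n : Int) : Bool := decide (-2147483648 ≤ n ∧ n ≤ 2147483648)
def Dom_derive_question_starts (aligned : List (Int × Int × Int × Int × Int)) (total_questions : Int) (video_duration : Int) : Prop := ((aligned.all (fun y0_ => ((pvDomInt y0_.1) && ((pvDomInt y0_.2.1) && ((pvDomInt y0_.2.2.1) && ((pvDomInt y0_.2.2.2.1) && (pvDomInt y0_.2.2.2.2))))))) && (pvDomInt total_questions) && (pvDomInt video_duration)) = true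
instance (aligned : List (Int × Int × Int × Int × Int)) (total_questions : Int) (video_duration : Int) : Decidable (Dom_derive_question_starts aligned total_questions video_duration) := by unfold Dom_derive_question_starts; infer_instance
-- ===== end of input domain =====

-- B replaces A's two per-question linear filtering passes with a direct sorted build of the known
-- points plus bisect_left binary search per gap (objective: faster). Return values are identical.
-- ===== PORT A =====
-- Shared IEEE-754 helpers: CPython's float arithmetic in the two sources is the SAME expressions
-- ('(qn-q_b)/(q_a-q_b)', '* (t_a-t_b)', 't_b + …', 'int(…)'); both ports use these exact-rational
-- models of binary64 round-to-nearest-even (exact for this task's magnitudes: no overflow/subnormals).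
-- pvRLog2 q = floor (log2 q) for q > 0
def pvRLog2 (q : ℚ) : Int :=
  let d : Int := (Nat.log2 q.num.toNat : Int) - (Nat.log2 q.den : Int)
  if (2 : ℚ) ^ d ≤ q then d else d - 1

-- round a rational to the nearest IEEE binary64 value (ties to even), as an exact rational
def pvRoundD (q : ℚ) : ℚ :=
  if q = 0 then 0
  else
    let p := |q|
    let e : Int := pvRLog2 p - 52
    let scaled := p / (2 : ℚ) ^ e
    let n : Int := ⌊scaled⌋
    let frac := scaled - (n : ℚ)
    let m : Int :=
      if frac < 1 / 2 then n
      else if 1 / 2 < frac then n + 1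
      else if n % 2 = 0 then n else n + 1
    ((if q < 0 then -m else m : Int) : ℚ) * (2 : ℚ) ^ e

-- Python int(x) on a float: truncation toward zero
def pvTrunc (x : ℚ) : Int := if x < 0 then -⌊-x⌋ else ⌊x⌋

-- Python a / b on ints (true division into a float)
def pvDiv (a b : Int) : ℚ := pvRoundD ((a : ℚ) / (b : ℚ))

-- int(t_b + (qn - q_b)/(q_a - q_b) * (t_a - t_b)) — each float operation rounded separately
def pvInterp (qn qb tb qa ta : Int) : Int :=
  pvTrunc (pvRoundD ((tb : ℚ) + pvRoundD (pvDiv (qn - qb) (qa - qb) * ((ta - tb : Int) : ℚ))))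

-- min(int(t_b + (qn - q_b) * avg), video_duration - 10)
def pvExtrap (qn qb tb : Int) (avg : ℚ) (vd : Int) : Int :=
  min (pvTrunc (pvRoundD ((tb : ℚ) + pvRoundD (((qn - qb : Int) : ℚ) * avg)))) (vd - 10)

-- 'sorted(question_starts.items())' compares (key, value) tuples, but the dict's keys are distinct,
-- so sorting by the key alone is exact (the second tuple component is never consulted).
-- 'before[-1]' / 'after[0]' / 'known[-1]' / 'known[0]' are guarded nonempty in the source, so the
-- '.getD' defaults below are never consulted.
def derive_question_starts (aligned : List (Int × Int × Int × Int × Int)) (total_questions : Int) (video_duration : Int) : List (Int × Int) :=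
  let answer_times : PySem.Dict Int Int :=
    aligned.foldl (fun d y => d.insert y.1 y.2.1) PySem.Dict.empty
  let question_starts : PySem.Dict Int Int :=
    (PySem.List.pyRange 1 (total_questions + 1) 1).foldl (fun qs qn =>
      if qn == 1 then
        if answer_times.contains 1 then
          qs.insert 1 (max (answer_times.getD 1 0 - 60) 0)
        else qs.insert 1 240
      else if answer_times.contains (qn - 1) then
        qs.insert qn (answer_times.getD (qn - 1) 0 + 3)
      else qs) PySem.Dict.empty
  let known : List (Int × Int) := PySem.List.sorted question_starts.items (fun p => p.1)
  let qs2 : PySem.Dict Int Int :=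
    (PySem.List.pyRange 1 (total_questions + 1) 1).foldl (fun qs qn =>
      if qs.contains qn then qs
      else
        let before := known.filter (fun p => decide (p.1 < qn))
        let after := known.filter (fun p => decide (qn < p.1))
        if !before.isEmpty && !after.isEmpty then
          let qb := before.getLast?.getD (0, 0)
          let qa := after.head?.getD (0, 0)
          qs.insert qn (pvInterp qn qb.1 qb.2 qa.1 qa.2)
        else if !before.isEmpty then
          let qb := before.getLast?.getD (0, 0)
          let kl := known.getLast?.getD (0, 0)
          let kf := known.head?.getD (0, 0)
          let avg := pvDiv (kl.2 - kf.2) (max (kl.1 - kf.1) 1)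
          qs.insert qn (pvExtrap qn qb.1 qb.2 avg video_duration)
        else qs.insert qn 0) question_starts
  qs2.items

-- ===== PORT B =====
-- Source B: known points built directly as a sorted list (no dict + sorted), neighbours of a gap found
-- with bisect_left (PySem.List.bisectLeft), average pace hoisted out of the loop.
-- 'known[i-1]' is reached only with i ≥ 1 and 'known[-1]' only with known nonempty, so the
-- '.getD' defaults are never consulted.
def derive_question_starts_alt (aligned : List (Int × Int × Int × Int × Int)) (total_questions : Int) (video_duration : Int) : List (Int × Int) :=
  let answer_times : PySem.Dict Int Int :=
    aligned.foldl (fun d y => d.insert y.1 y.2.1) PySem.Dict.empty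
  let known : List (Int × Int) :=
    if 1 ≤ total_questions then
      (PySem.List.pyRange 2 (total_questions + 1) 1).foldl (fun acc qn =>
        if answer_times.contains (qn - 1) then
          acc ++ [(qn, answer_times.getD (qn - 1) 0 + 3)]
        else acc)
        [if answer_times.contains 1 then (1, max (answer_times.getD 1 0 - 60) 0)
         else ((1 : Int), (240 : Int))]
    else []
  let keys : List Int := known.map (fun p => p.1)
  let avg : ℚ :=
    if !known.isEmpty then
      let kl := known.getLast?.getD (0, 0)
      let kf := known.head?.getD (0, 0)
      pvDiv (kl.2 - kf.2) (max (kl.1 - kf.1) 1)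
    else 0
  let out0 : PySem.Dict Int Int :=
    known.foldl (fun d p => d.insert p.1 p.2) PySem.Dict.empty
  let out : PySem.Dict Int Int :=
    (PySem.List.pyRange 1 (total_questions + 1) 1).foldl (fun d qn =>
      if d.contains qn then d
      else
        let i := PySem.List.bisectLeft keys qn
        if i < keys.length then
          let qb := known.getD (i - 1) (0, 0)
          let qa := known.getD i (0, 0)
          d.insert qn (pvInterp qn qb.1 qb.2 qa.1 qa.2)
        else
          let qb := known.getLast?.getD (0, 0)
          d.insert qn (pvExtrap qn qb.1 qb.2 avg video_duration)) out0
  out.items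

-- ===== PRECONDITION & SPEC =====
def Spec_derive_question_starts (aligned : List (Int × Int × Int × Int × Int)) (total_questions : Int) (video_duration : Int) (out : List (Int × Int)) : Prop := out = derive_question_starts_alt aligned total_questions video_duration
instance (aligned : List (Int × Int × Int × Int × Int)) (total_questions : Int) (video_duration : Int) (out : List (Int × Int)) : Decidable (Spec_derive_question_starts aligned total_questions video_duration out) := by unfold Spec_derive_question_starts; infer_instance

-- ===== CLAIM (what is proved, stated in full; the proofs are below) =====
def Claim_equal_derive_question_starts : Prop := ∀ (aligned : List (Int × Int × Int × Int × Int)) (total_questions : Int) (video_duration : Int), Dom_derive_question_starts aligned total_questions video_duration → Spec_derive_question_starts aligned total_questions video_duration (derive_question_starts aligned total_questions video_duration)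

-- ===== LEMMAS AND PROOFS =====

-- proof-side names for the pieces shared by the two ports
def pvE1 (at_ : PySem.Dict Int Int) : Int × Int :=
  if at_.contains 1 then (1, max (at_.getD 1 0 - 60) 0) else ((1 : Int), (240 : Int))

def pvTail (at_ : PySem.Dict Int Int) (tq : Int) : List (Int × Int) :=
  ((PySem.List.pyRange 2 (tq + 1) 1).filter (fun qn => at_.contains (qn - 1))).map
    (fun qn => (qn, at_.getD (qn - 1) 0 + 3))

def pvKnown (at_ : PySem.Dict Int Int) (tq : Int) : List (Int × Int) :=
  if 1 ≤ tq then pvE1 at_ :: pvTail at_ tq else []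

def pvQS1 (at_ : PySem.Dict Int Int) (tq : Int) : PySem.Dict Int Int :=
  (PySem.List.pyRange 1 (tq + 1) 1).foldl (fun qs qn =>
    if qn == 1 then
      if at_.contains 1 then qs.insert 1 (max (at_.getD 1 0 - 60) 0)
      else qs.insert 1 240
    else if at_.contains (qn - 1) then qs.insert qn (at_.getD (qn - 1) 0 + 3)
    else qs) PySem.Dict.empty

-- a conditional-insert loop over fresh distinct keys appends its (key, value) pairs
theorem pv_items_foldl_insert_if (l : List Int) (d : PySem.Dict Int Int)
    (c : Int → Bool) (v : Int → Int)
    (hfresh : ∀ x ∈ l, d.contains x = false) (hnd : l.Nodup) :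
    (l.foldl (fun qs qn => if c qn then qs.insert qn (v qn) else qs) d).items
      = d.items ++ (l.filter c).map (fun qn => (qn, v qn)) := by
  induction l generalizing d with
  | nil => simp
  | cons x l ih =>
    simp only [List.foldl_cons, List.filter_cons]
    by_cases hc : c x
    · simp only [hc, if_true]
      rw [ih (d.insert x (v x)) ?_ hnd.of_cons]
      · rw [PySem.Dict.items_insert_of_not_contains d (v x) (hfresh x (by simp))]
        simp
      · intro y hy
        rw [PySem.Dict.contains_insert]
        have : y ≠ x := by rintro rfl; exact (List.nodup_cons.mp hnd).1 hy
        simp [this, hfresh y (by simp [hy])]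
    · simp only [hc, Bool.false_eq_true, if_false]
      exact ih d (fun y hy => hfresh y (by simp [hy])) hnd.of_cons

theorem pvQS1_items (at_ : PySem.Dict Int Int) (tq : Int) :
    (pvQS1 at_ tq).items = pvKnown at_ tq := by
  unfold pvQS1 pvKnown
  by_cases htq : 1 ≤ tq
  · rw [PySem.List.pyRange_one_cons (by omega : (1 : Int) < tq + 1)]
    simp only [List.foldl_cons, BEq.rfl, if_true]
    rw [PySem.List.foldl_congr_mem _ _
      (fun qs qn => if at_.contains (qn - 1) then qs.insert qn (at_.getD (qn - 1) 0 + 3) else qs) _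
      (fun acc x hx => by
        have h2 : (2 : Int) ≤ x := (PySem.List.mem_pyRange_one.mp hx).1
        have : (x == 1) = false := by simp; omega
        simp only [this, Bool.false_eq_true, if_false])]
    rw [pv_items_foldl_insert_if _ _ _ _
      (fun x hx => by
        have h2 : (2 : Int) ≤ x := (PySem.List.mem_pyRange_one.mp hx).1
        split <;>
          rw [PySem.Dict.contains_insert] <;>
            simp [PySem.Dict.contains_empty] <;> omega)
      (PySem.List.nodup_pyRange_one _ _)]
    have hitems : ∀ (w : Int),
        ((PySem.Dict.empty : PySem.Dict Int Int).insert 1 w).items = [(1, w)] := fun w => rfl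
    unfold pvE1 pvTail
    split <;> simp [hitems]
  · rw [PySem.List.pyRange_one_eq_nil (by omega)]
    simp [htq, show (PySem.Dict.empty : PySem.Dict Int Int).items = [] from rfl]

theorem pvKnown_pairwise (at_ : PySem.Dict Int Int) (tq : Int) :
    (pvKnown at_ tq).Pairwise (fun a b => a.1 < b.1) := by
  unfold pvKnown
  split
  · have htail : (pvTail at_ tq).Pairwise (fun a b => a.1 < b.1) := by
      unfold pvTail
      rw [List.pairwise_map]
      exact ((PySem.List.pairwise_lt_pyRange_one 2 (tq + 1)).filter _)
    refine List.pairwise_cons.mpr ⟨?_, htail⟩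
    intro b hb
    have h1 : (pvE1 at_).1 = 1 := by unfold pvE1; split <;> rfl
    have : 2 ≤ b.1 := by
      unfold pvTail at hb
      obtain ⟨qn, hqn, rfl⟩ := List.mem_map.mp hb
      exact (PySem.List.mem_pyRange_one.mp (List.mem_of_mem_filter hqn)).1
    omega
  · simp

theorem pvKnown_sorted (at_ : PySem.Dict Int Int) (tq : Int) :
    PySem.List.sorted (pvQS1 at_ tq).items (fun p => p.1) = pvKnown at_ tq := by
  refine PySem.List.sorted_eq_of_perm_of_pairwise_lt _ _ _ ?_ (pvKnown_pairwise at_ tq)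
  rw [pvQS1_items]

theorem pvKnown_keys_nodup (at_ : PySem.Dict Int Int) (tq : Int) :
    ((pvKnown at_ tq).map (fun p => p.1)).Nodup := by
  exact (List.pairwise_map.mpr (pvKnown_pairwise at_ tq)).imp (fun h => ne_of_lt h)

theorem pvOut0_eq (at_ : PySem.Dict Int Int) (tq : Int) :
    (pvKnown at_ tq).foldl (fun d p => d.insert p.1 p.2) PySem.Dict.empty = pvQS1 at_ tq := by
  apply PySem.Dict.ext
  rw [pvQS1_items,
    PySem.Dict.items_foldl_insert_fresh (pvKnown at_ tq) (fun p => p.1) (fun p => p.2)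
      PySem.Dict.empty (fun a _ => PySem.Dict.contains_empty _) (pvKnown_keys_nodup at_ tq)]
  simp [show (PySem.Dict.empty : PySem.Dict Int Int).items = [] from rfl]

-- a predicate true exactly on indices below i selects the prefix
theorem pv_filter_eq_take {α : Type} (xs : List α) (p : α → Bool) (i : Nat) (hi : i ≤ xs.length)
    (h : ∀ j (hj : j < xs.length), p xs[j] = decide (j < i)) : xs.filter p = xs.take i := by
  induction xs generalizing i with
  | nil => simp
  | cons x xs ih =>
    cases i with
    | zero =>
      have hall : ∀ a ∈ x :: xs, p a = false := by
        intro a ha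
        obtain ⟨j, hj, rfl⟩ := List.mem_iff_getElem.mp ha
        simpa using h j hj
      have hnil : List.filter p (x :: xs) = [] :=
        List.filter_eq_nil_iff.mpr (fun a ha => by simp [hall a ha])
      simp [hnil]
    | succ k =>
      have h0 : p x = true := by simpa using h 0 (by simp)
      simp only [List.filter_cons, h0, if_true, List.take_succ_cons]
      congr 1
      exact ih k (by simpa using hi) (fun j hj => by simpa using h (j + 1) (by simpa using hj))

-- a predicate true exactly on indices from i on selects the suffix
theorem pv_filter_eq_drop {α : Type} (xs : List α) (p : α → Bool) (i : Nat) (hi : i ≤ xs.length)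
    (h : ∀ j (hj : j < xs.length), p xs[j] = decide (i ≤ j)) : xs.filter p = xs.drop i := by
  induction xs generalizing i with
  | nil => simp
  | cons x xs ih =>
    cases i with
    | zero =>
      have hall : ∀ a ∈ x :: xs, p a = true := by
        intro a ha
        obtain ⟨j, hj, rfl⟩ := List.mem_iff_getElem.mp ha
        simpa using h j hj
      simp [List.filter_eq_self.mpr hall]
    | succ k =>
      have h0 : p x = false := by simpa using h 0 (by simp)
      simp only [List.filter_cons, h0, Bool.false_eq_true, if_false, List.drop_succ_cons]
      exact ih k (by simpa using hi) (fun j hj => by simpa using h (j + 1) (by simpa using hj))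

-- the two interpolation loops agree step by step once the dict covers the known keys
theorem pv_loop_eq (known : List (Int × Int)) (vd : Int)
    (hpw : known.Pairwise (fun a b => a.1 < b.1))
    (hhead : (known.map (fun p => p.1)).head? = some 1)
    (l : List Int) (hl : ∀ qn ∈ l, 1 ≤ qn)
    (d : PySem.Dict Int Int) (hd : ∀ k ∈ known.map (fun p => p.1), d.contains k = true) :
    l.foldl (fun qs qn =>
      if qs.contains qn then qs
      else
        let before := known.filter (fun p => decide (p.1 < qn))
        let after := known.filter (fun p => decide (qn < p.1))
        if !before.isEmpty && !after.isEmpty then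
          let qb := before.getLast?.getD (0, 0)
          let qa := after.head?.getD (0, 0)
          qs.insert qn (pvInterp qn qb.1 qb.2 qa.1 qa.2)
        else if !before.isEmpty then
          let qb := before.getLast?.getD (0, 0)
          let kl := known.getLast?.getD (0, 0)
          let kf := known.head?.getD (0, 0)
          let avg := pvDiv (kl.2 - kf.2) (max (kl.1 - kf.1) 1)
          qs.insert qn (pvExtrap qn qb.1 qb.2 avg vd)
        else qs.insert qn 0) d
    = l.foldl (fun d qn =>
      if d.contains qn then d
      else
        let i := PySem.List.bisectLeft (known.map (fun p => p.1)) qn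
        if i < (known.map (fun p => p.1)).length then
          let qb := known.getD (i - 1) (0, 0)
          let qa := known.getD i (0, 0)
          d.insert qn (pvInterp qn qb.1 qb.2 qa.1 qa.2)
        else
          let qb := known.getLast?.getD (0, 0)
          d.insert qn (pvExtrap qn qb.1 qb.2
            (if !known.isEmpty then
              pvDiv ((known.getLast?.getD (0, 0)).2 - (known.head?.getD (0, 0)).2)
                (max ((known.getLast?.getD (0, 0)).1 - (known.head?.getD (0, 0)).1) 1)
             else 0) vd)) d := by
  induction l generalizing d with
  | nil => rfl
  | cons x l ih =>
    have hx1 : 1 ≤ x := hl x (by simp)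
    have hl' : ∀ qn ∈ l, 1 ≤ qn := fun qn h => hl qn (by simp [h])
    simp only [List.foldl_cons]
    by_cases hc : d.contains x = true
    · simp only [hc, if_true]
      exact ih hl' d hd
    · have hc' : d.contains x = false := by simpa using hc
      have hne : known ≠ [] := by
        intro h; rw [h] at hhead; simp at hhead
      have hlen0 : 0 < known.length := List.length_pos_iff.mpr hne
      have hkeys0 : known[0].1 = 1 := by
        have h0 : known.head? = some known[0] := by
          rw [List.head?_eq_getElem?]; simp [hlen0]
        rw [List.head?_map, h0] at hhead
        simpa using hhead
      have hnotin : x ∉ known.map (fun p => p.1) := by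
        intro hmem
        rw [hd x hmem] at hc'
        simp at hc'
      have hnex : ∀ j (hj : j < known.length), known[j].1 ≠ x := by
        intro j hj h
        exact hnotin (List.mem_map.mpr ⟨known[j], List.getElem_mem hj, h⟩)
      have hsorted : (known.map (fun p => p.1)).Pairwise (· ≤ ·) :=
        (List.pairwise_map.mpr hpw).imp (fun h => le_of_lt h)
      obtain ⟨hile, hlt, hge⟩ := PySem.List.bisectLeft_spec (known.map (fun p => p.1)) x hsorted
      set i := PySem.List.bisectLeft (known.map (fun p => p.1)) x with hidef
      rw [List.length_map] at hile
      have hiff : ∀ j (hj : j < known.length), (known[j].1 < x ↔ j < i) := by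
        intro j hj
        constructor
        · intro hlt'
          by_contra hge'
          have := hge j (by simpa using hj) (by omega)
          rw [List.getElem_map] at this
          omega
        · intro hj'
          have := hlt j (by simpa using hj) hj'
          rwa [List.getElem_map] at this
      have hbefore := pv_filter_eq_take known (fun p => decide (p.1 < x)) i hile
        (fun j hj => by
          by_cases hj' : j < i
          · simp [hj', (hiff j hj).mpr hj']
          · have h2 : ¬ known[j].1 < x := fun hltx => hj' ((hiff j hj).mp hltx)
            simp [hj', h2])
      have hafter := pv_filter_eq_drop known (fun p => decide (x < p.1)) i hile
        (fun j hj => by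
          have h1 := hiff j hj
          have h2 := hnex j hj
          by_cases hj' : i ≤ j
          · have h3 : x < known[j].1 := by omega
            simp [hj', h3]
          · have h3 : ¬ x < known[j].1 := by omega
            simp [hj', h3])
      have h1i : 1 ≤ i := by
        by_contra h0
        have hx0 := hge 0 (by simpa using hlen0) (by omega)
        rw [List.getElem_map, hkeys0] at hx0
        exact hnex 0 hlen0 (by rw [hkeys0]; omega)
      by_cases hi : i < known.length
      · have htake_ne : (known.take i).isEmpty = false := by
          rw [List.isEmpty_eq_false_iff, ne_eq, List.take_eq_nil_iff]
          exact fun h => h.elim (by omega) hne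
        have hdrop_ne : (known.drop i).isEmpty = false := by
          rw [List.isEmpty_eq_false_iff, ne_eq, List.drop_eq_nil_iff]
          omega
        have hgetlast : (known.take i).getLast? = some known[i - 1] := by
          rw [List.getLast?_eq_getElem?]
          simp [List.length_take, Nat.min_eq_left (le_of_lt hi), List.getElem?_take]
          omega
        have hheadd : (known.drop i).head? = some known[i] := by
          rw [List.head?_eq_getElem?]
          simp [hi]
        have hgd1 : known.getD (i - 1) (0, 0) = known[i - 1] :=
          List.getD_eq_getElem _ _ (by omega)
        have hgd2 : known.getD i (0, 0) = known[i] :=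
          List.getD_eq_getElem _ _ hi
        have hi' : i < (List.map (fun p => p.1) known).length := by
          simpa using hi
        simp only [hc', Bool.false_eq_true, if_false, hbefore, hafter, htake_ne, hdrop_ne,
          Bool.not_false, Bool.and_self, if_true, hgetlast, hheadd, Option.getD_some,
          if_pos hi', hgd1, hgd2]
        exact ih hl' _ (fun k hk => by
          rw [PySem.Dict.contains_insert, hd k hk, Bool.or_true])
      · have hieq : i = known.length := by omega
        have htake_all : known.take i = known := by
          rw [hieq]; exact List.take_length
        have hdrop_nil : known.drop i = [] := by
          rw [hieq]; exact List.drop_length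
        have htake_ne : known.isEmpty = false := by
          simpa [List.isEmpty_eq_false_iff] using hne
        have hi' : ¬ i < (List.map (fun p => p.1) known).length := by
          simpa using hi
        simp only [hc', Bool.false_eq_true, if_false, hbefore, hafter, htake_all, hdrop_nil,
          List.isEmpty_nil, Bool.not_true, Bool.and_false, htake_ne, Bool.not_false, if_true,
          if_neg hi']
        refine (ih hl' _ (fun k hk => by
          rw [PySem.Dict.contains_insert, hd k hk, Bool.or_true])).trans
          (PySem.List.foldl_congr_mem l _ _ _ (fun acc y hy => by
            simp only [htake_ne, Bool.not_false, if_true]))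

theorem pv_master (at_ : PySem.Dict Int Int) (tq vd : Int) :
    ((PySem.List.pyRange 1 (tq + 1) 1).foldl (fun qs qn =>
      if qs.contains qn then qs
      else
        let known := PySem.List.sorted (pvQS1 at_ tq).items (fun p => p.1)
        let before := known.filter (fun p => decide (p.1 < qn))
        let after := known.filter (fun p => decide (qn < p.1))
        if !before.isEmpty && !after.isEmpty then
          let qb := before.getLast?.getD (0, 0)
          let qa := after.head?.getD (0, 0)
          qs.insert qn (pvInterp qn qb.1 qb.2 qa.1 qa.2)
        else if !before.isEmpty then
          let qb := before.getLast?.getD (0, 0)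
          let kl := known.getLast?.getD (0, 0)
          let kf := known.head?.getD (0, 0)
          let avg := pvDiv (kl.2 - kf.2) (max (kl.1 - kf.1) 1)
          qs.insert qn (pvExtrap qn qb.1 qb.2 avg vd)
        else qs.insert qn 0) (pvQS1 at_ tq)).items
    = ((PySem.List.pyRange 1 (tq + 1) 1).foldl (fun d qn =>
      if d.contains qn then d
      else
        let i := PySem.List.bisectLeft ((pvKnown at_ tq).map (fun p => p.1)) qn
        if i < ((pvKnown at_ tq).map (fun p => p.1)).length then
          let qb := (pvKnown at_ tq).getD (i - 1) (0, 0)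
          let qa := (pvKnown at_ tq).getD i (0, 0)
          d.insert qn (pvInterp qn qb.1 qb.2 qa.1 qa.2)
        else
          let qb := (pvKnown at_ tq).getLast?.getD (0, 0)
          d.insert qn (pvExtrap qn qb.1 qb.2
            (if !(pvKnown at_ tq).isEmpty then
              pvDiv (((pvKnown at_ tq).getLast?.getD (0, 0)).2 - ((pvKnown at_ tq).head?.getD (0, 0)).2)
                (max (((pvKnown at_ tq).getLast?.getD (0, 0)).1 - ((pvKnown at_ tq).head?.getD (0, 0)).1) 1)
             else 0) vd))
      ((pvKnown at_ tq).foldl (fun d p => d.insert p.1 p.2) PySem.Dict.empty)).items := by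
  rw [pvOut0_eq]
  by_cases htq : 1 ≤ tq
  · simp only [pvKnown_sorted]
    congr 1
    refine pv_loop_eq (pvKnown at_ tq) vd (pvKnown_pairwise at_ tq) ?_ _
      (fun qn h => (PySem.List.mem_pyRange_one.mp h).1) (pvQS1 at_ tq) ?_
    · unfold pvKnown
      rw [if_pos htq]
      have h1 : (pvE1 at_).1 = 1 := by unfold pvE1; split <;> rfl
      simp [h1]
    · intro k hk
      have hkeys : (pvQS1 at_ tq).keys = (pvKnown at_ tq).map (fun p => p.1) := by
        simp only [PySem.Dict.keys, pvQS1_items]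
      exact (PySem.Dict.contains_iff_mem_keys _ _).mpr (by rw [hkeys]; exact hk)
  · rw [PySem.List.pyRange_one_eq_nil (by omega)]
    simp only [List.foldl_nil]




theorem pv_knownB_eq (at_ : PySem.Dict Int Int) (tq : Int) :
    (if 1 ≤ tq then
        (PySem.List.pyRange 2 (tq + 1) 1).foldl (fun acc qn =>
          if at_.contains (qn - 1) then acc ++ [(qn, at_.getD (qn - 1) 0 + 3)] else acc)
          [if at_.contains 1 then (1, max (at_.getD 1 0 - 60) 0) else ((1 : Int), (240 : Int))]
      else []) = pvKnown at_ tq := by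
  unfold pvKnown pvE1 pvTail
  split
  · rw [PySem.List.foldl_append_if (fun qn => at_.contains (qn - 1))
      (fun qn => (qn, at_.getD (qn - 1) 0 + 3))]
    simp
  · rfl


theorem pv_qs1_def (at_ : PySem.Dict Int Int) (tq : Int) :
    (PySem.List.pyRange 1 (tq + 1) 1).foldl (fun qs qn =>
      if qn == 1 then
        if at_.contains 1 then qs.insert 1 (max (at_.getD 1 0 - 60) 0)
        else qs.insert 1 240
      else if at_.contains (qn - 1) then qs.insert qn (at_.getD (qn - 1) 0 + 3)
      else qs) PySem.Dict.empty = pvQS1 at_ tq := rfl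

-- ===== VERDICT (by name: the statement is the Claim_ definition above) =====
theorem derive_question_starts_spec : Claim_equal_derive_question_starts := by
  intro aligned tq vd _
  unfold Spec_derive_question_starts derive_question_starts derive_question_starts_alt
  simp only [pv_qs1_def, pv_knownB_eq]
  generalize List.foldl (fun d y => d.insert y.1 y.2.1) PySem.Dict.empty aligned = at_
  exact pv_master at_ tq vd
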